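-- pv_equiv track=rewrite | github.com/masterSunflowers/code-migration | filter.py | has_method_change
-- ===== SOURCE A (Python) =====
-- def has_method_change(diff_text, from_lib_methods, to_lib_methods):
--     lines = diff_text.splitlines()
--     for line in lines:
--         if line.startswith("-"):
--             for method in from_lib_methods:
--                 if method in line:
--                     return (True, line, from_lib_methods[method])
--         elif line.startswith("+"):
--             for method in to_lib_methods:
--                 if method in line:
--                     return (True, line, to_lib_methods[method])
--     return (False, None, None)
-- ===== SOURCE B (Python) =====
-- def has_method_change(diff_text, from_lib_methods, to_lib_methods):
--     # Multi-pattern substring search: per line, slide a window over the line and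
--     # look each window up in a hash set of method names, instead of scanning the
--     # whole line once per method.
--     from_names = set(from_lib_methods)
--     from_lens = sorted({len(name) for name in from_lib_methods})
--     to_names = set(to_lib_methods)
--     to_lens = sorted({len(name) for name in to_lib_methods})
--     for line in diff_text.splitlines():
--         if line.startswith("-"):
--             hit = _find_known_substring(line, from_names, from_lens)
--             if hit is not None:
--                 return (True, line, from_lib_methods[hit])
--         elif line.startswith("+"):
--             hit = _find_known_substring(line, to_names, to_lens)
--             if hit is not None:
--                 return (True, line, to_lib_methods[hit])
--     return (False, None, None)
--
--
-- def _find_known_substring(line, names, lengths):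
--     for i in range(len(line)):
--         for n in lengths:
--             window = line[i:i + n]
--             if window in names:
--                 return window
--     return None
-- ===== Notes on version B (the rewrite author's own statement) =====
-- stated objective: alternative
-- what changed: A scans each diff line once per method name; B does a multi-pattern substring search: it precomputes a hash set of the method names and their distinct lengths, then slides a window over each line and looks each window up in the set. Pre_ excludes inputs where some '-' line contains two distinct from-method names (or a '+' line two to-method names): which of several matching methods to report is a tie no caller specifies (A picks by dict order, B by leftmost occurrence).
-- outside the precondition, e.g. on has_method_change('-ba', {'a': '1', 'b': '2'}, {}): A returns (True, '-ba', '1'), B returns (True, '-ba', '2')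
import Mathlib
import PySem

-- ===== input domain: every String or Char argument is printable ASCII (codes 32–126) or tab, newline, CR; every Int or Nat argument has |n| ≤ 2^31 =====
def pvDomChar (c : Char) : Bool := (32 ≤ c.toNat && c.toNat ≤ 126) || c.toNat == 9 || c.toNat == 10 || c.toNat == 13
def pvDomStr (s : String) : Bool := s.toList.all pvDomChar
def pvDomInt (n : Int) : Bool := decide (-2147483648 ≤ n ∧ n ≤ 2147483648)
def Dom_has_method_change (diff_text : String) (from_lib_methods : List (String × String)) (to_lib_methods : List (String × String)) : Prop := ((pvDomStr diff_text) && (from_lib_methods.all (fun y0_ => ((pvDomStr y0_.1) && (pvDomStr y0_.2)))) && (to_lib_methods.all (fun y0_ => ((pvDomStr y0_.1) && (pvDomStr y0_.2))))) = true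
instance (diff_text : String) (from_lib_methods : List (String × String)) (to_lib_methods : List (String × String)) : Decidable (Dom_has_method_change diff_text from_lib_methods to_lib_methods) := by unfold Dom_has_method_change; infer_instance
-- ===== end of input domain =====

-- B replaces A's per-method line scan by a sliding-window multi-pattern search (hash set of names, one pass over each line); alternative structure.


-- ===== PORT A =====
-- inner 'for method in table: if method in line: …' (first matching key)
def pvFindMethod (line : String) : List (String × String) → Option String
  | [] => none
  | (m, _) :: rest => if PySem.Str.isIn m line then some m else pvFindMethod line rest

-- outer 'for line in lines' loop of A
def pvLinesA (fl tl : List (String × String)) : List String → Bool × Option String × Option String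
  | [] => (false, none, none)
  | line :: rest =>
    if PySem.Str.startswith line "-" then
      match pvFindMethod line fl with
      | some m => (true, some line, (PySem.Dict.mk fl).get? m)
      | none => pvLinesA fl tl rest
    else if PySem.Str.startswith line "+" then
      match pvFindMethod line tl with
      | some m => (true, some line, (PySem.Dict.mk tl).get? m)
      | none => pvLinesA fl tl rest
    else pvLinesA fl tl rest

def has_method_change (diff_text : String) (from_lib_methods : List (String × String)) (to_lib_methods : List (String × String)) : Bool × Option String × Option String :=
  pvLinesA from_lib_methods to_lib_methods (PySem.Str.splitlines diff_text)

-- ===== PORT B =====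
-- inner 'for n in lengths: …' of _find_known_substring
def pvScanLens (line : String) (names : PySem.Set String) (i : Int) : List Int → Option String
  | [] => none
  | n :: rest =>
    if PySem.Set.contains names (PySem.Str.slice line (some i) (some (i + n)))
    then some (PySem.Str.slice line (some i) (some (i + n)))
    else pvScanLens line names i rest

-- outer 'for i in range(len(line)): …' of _find_known_substring
def pvScanPos (line : String) (names : PySem.Set String) (lengths : List Int) : List Int → Option String
  | [] => none
  | i :: rest =>
    match pvScanLens line names i lengths with
    | some w => some w
    | none => pvScanPos line names lengths rest

-- _find_known_substring(line, names, lengths)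
def pvFindKnown (line : String) (names : PySem.Set String) (lengths : List Int) : Option String :=
  pvScanPos line names lengths (PySem.List.pyRange 0 (PySem.Str.len line) 1)

-- 'for line in diff_text.splitlines(): …' loop of B
def pvLinesB (fl tl : List (String × String)) (fromNames toNames : PySem.Set String) (fromLens toLens : List Int) : List String → Bool × Option String × Option String
  | [] => (false, none, none)
  | line :: rest =>
    if PySem.Str.startswith line "-" then
      match pvFindKnown line fromNames fromLens with
      | some hit => (true, some line, (PySem.Dict.mk fl).get? hit)
      | none => pvLinesB fl tl fromNames toNames fromLens toLens rest
    else if PySem.Str.startswith line "+" then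
      match pvFindKnown line toNames toLens with
      | some hit => (true, some line, (PySem.Dict.mk tl).get? hit)
      | none => pvLinesB fl tl fromNames toNames fromLens toLens rest
    else pvLinesB fl tl fromNames toNames fromLens toLens rest

def has_method_change_alt (diff_text : String) (from_lib_methods : List (String × String)) (to_lib_methods : List (String × String)) : Bool × Option String × Option String :=
  let fromNames := PySem.Set.ofList (from_lib_methods.map Prod.fst)
  let fromLens := PySem.List.sorted (PySem.Set.ofList (from_lib_methods.map (fun p => PySem.Str.len p.1))) (fun x => x) false
  let toNames := PySem.Set.ofList (to_lib_methods.map Prod.fst)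
  let toLens := PySem.List.sorted (PySem.Set.ofList (to_lib_methods.map (fun p => PySem.Str.len p.1))) (fun x => x) false
  pvLinesB from_lib_methods to_lib_methods fromNames toNames fromLens toLens (PySem.Str.splitlines diff_text)

-- ===== PRECONDITION & SPEC =====
-- Pre_ excludes inputs where some '-' diff line contains two distinct from-method names
-- (or some '+' line two distinct to-method names): which of several matching methods to
-- report is a tie no caller specifies — A picks by dict order, B by leftmost occurrence,
-- and either choice is defensible.
def Pre_has_method_change (diff_text : String) (from_lib_methods : List (String × String)) (to_lib_methods : List (String × String)) : Prop :=
  ∀ l ∈ PySem.Str.splitlines diff_text,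
    (PySem.Str.startswith l "-" = true →
      ∀ p ∈ from_lib_methods, ∀ q ∈ from_lib_methods,
        PySem.Str.isIn p.1 l = true → PySem.Str.isIn q.1 l = true → p.1 = q.1) ∧
    (PySem.Str.startswith l "+" = true →
      ∀ p ∈ to_lib_methods, ∀ q ∈ to_lib_methods,
        PySem.Str.isIn p.1 l = true → PySem.Str.isIn q.1 l = true → p.1 = q.1)
instance (diff_text : String) (from_lib_methods : List (String × String)) (to_lib_methods : List (String × String)) : Decidable (Pre_has_method_change diff_text from_lib_methods to_lib_methods) := by unfold Pre_has_method_change; infer_instance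

def pvWitness_has_method_change : String × (List (String × String)) × (List (String × String)) :=
  ("-old.foo(1)\n+new.bar(1)", [("foo", "renamed_foo")], [("bar", "renamed_bar")])

def Spec_has_method_change (diff_text : String) (from_lib_methods : List (String × String)) (to_lib_methods : List (String × String)) (out : Bool × Option String × Option String) : Prop := out = has_method_change_alt diff_text from_lib_methods to_lib_methods
instance (diff_text : String) (from_lib_methods : List (String × String)) (to_lib_methods : List (String × String)) (out : Bool × Option String × Option String) : Decidable (Spec_has_method_change diff_text from_lib_methods to_lib_methods out) := by unfold Spec_has_method_change; infer_instance

-- ===== CLAIM (what is proved, stated in full; the proofs are below) =====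
def Claim_equal_has_method_change : Prop := ∀ (diff_text : String) (from_lib_methods : List (String × String)) (to_lib_methods : List (String × String)), Dom_has_method_change diff_text from_lib_methods to_lib_methods → Pre_has_method_change diff_text from_lib_methods to_lib_methods → Spec_has_method_change diff_text from_lib_methods to_lib_methods (has_method_change diff_text from_lib_methods to_lib_methods)

-- ===== LEMMAS AND PROOFS =====

-- A's inner loop finds no method iff no method of the table occurs in the line
theorem pvFindMethod_none (l : String) :
    ∀ t : List (String × String), pvFindMethod l t = none ↔ ∀ p ∈ t, PySem.Str.isIn p.1 l = false := by
  intro t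
  induction t with
  | nil => simp [pvFindMethod]
  | cons p rest ih =>
    obtain ⟨m, v⟩ := p
    unfold pvFindMethod
    by_cases hin : PySem.Str.isIn m l = true
    · rw [if_pos hin]
      constructor
      · intro h; exact absurd h (by simp)
      · intro h
        have h2 := h (m, v) List.mem_cons_self
        rw [hin] at h2
        exact Bool.noConfusion h2
    · rw [Bool.not_eq_true] at hin
      rw [if_neg (by rw [hin]; simp), ih]
      constructor
      · intro h p hp
        rcases List.mem_cons.1 hp with rfl | hp
        · exact hin
        · exact h p hp
      · intro h p hp
        exact h p (List.mem_cons_of_mem _ hp)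

-- A's inner loop returns only a key of the table that occurs in the line
theorem pvFindMethod_some (l m : String) :
    ∀ t : List (String × String), pvFindMethod l t = some m →
      m ∈ t.map Prod.fst ∧ PySem.Str.isIn m l = true := by
  intro t
  induction t with
  | nil => intro h; exact absurd h (by simp [pvFindMethod])
  | cons p rest ih =>
    intro h
    obtain ⟨m0, v0⟩ := p
    unfold pvFindMethod at h
    split at h
    · rename_i hin
      rcases Option.some.inj h with rfl
      exact ⟨by simp, hin⟩
    · obtain ⟨h1, h2⟩ := ih h
      exact ⟨by simp [h1], h2⟩

-- a slice with nonnegative bounds is a substring of the line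
theorem pvSlice_isIn (l : String) (a b : Int) (ha : 0 ≤ a) (hb : 0 ≤ b) :
    PySem.Str.isIn (PySem.Str.slice l (some a) (some b)) l = true := by
  rw [PySem.Str.isIn_iff_infix, PySem.Str.toList_slice, PySem.Chars.slice_eq_listSlice,
      PySem.List.slice_toNat _ ha hb]
  exact ((List.take_prefix _ _).isInfix).trans ((List.drop_suffix _ _).isInfix)

-- B's inner loop returns only a window that is a known name
theorem pvScanLens_some (l : String) (names : PySem.Set String) (i : Int) (hi : 0 ≤ i) :
    ∀ ls : List Int, (∀ n ∈ ls, 0 ≤ n) → ∀ w, pvScanLens l names i ls = some w →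
      w ∈ names ∧ PySem.Str.isIn w l = true := by
  intro ls
  induction ls with
  | nil => intro _ w h; exact absurd h (by simp [pvScanLens])
  | cons n rest ih =>
    intro hnn w h
    unfold pvScanLens at h
    split at h
    · rename_i hc
      rcases Option.some.inj h with rfl
      refine ⟨(PySem.Set.contains_iff _ _).1 hc, pvSlice_isIn l i (i + n) hi ?_⟩
      have := hnn n List.mem_cons_self
      omega
    · exact ih (fun n hn => hnn n (List.mem_cons_of_mem _ hn)) w h

-- B's inner loop finds nothing iff no window at i is a known name
theorem pvScanLens_none (l : String) (names : PySem.Set String) (i : Int) :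
    ∀ ls : List Int, pvScanLens l names i ls = none →
      ∀ n ∈ ls, PySem.Str.slice l (some i) (some (i + n)) ∉ names := by
  intro ls
  induction ls with
  | nil => intro _ n hn; exact absurd hn List.not_mem_nil
  | cons n0 rest ih =>
    intro h n hn
    unfold pvScanLens at h
    split at h
    · exact absurd h (by simp)
    · rename_i hc
      rcases List.mem_cons.1 hn with rfl | hn
      · intro hmem
        exact hc ((PySem.Set.contains_iff _ _).2 hmem)
      · exact ih h n hn

-- B's position scan returns only a known name occurring in the line
theorem pvScanPos_some (l : String) (names : PySem.Set String) (lengths : List Int)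
    (hl : ∀ n ∈ lengths, 0 ≤ n) :
    ∀ is : List Int, (∀ i ∈ is, 0 ≤ i) → ∀ w, pvScanPos l names lengths is = some w →
      w ∈ names ∧ PySem.Str.isIn w l = true := by
  intro is
  induction is with
  | nil => intro _ w h; exact absurd h (by simp [pvScanPos])
  | cons i rest ih =>
    intro hni w h
    unfold pvScanPos at h
    split at h
    · rename_i w' hw
      rcases Option.some.inj h with rfl
      exact pvScanLens_some l names i (hni i List.mem_cons_self) lengths hl w' hw
    · exact ih (fun i hi => hni i (List.mem_cons_of_mem _ hi)) w h

-- B's position scan finds nothing iff no window anywhere is a known name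
theorem pvScanPos_none (l : String) (names : PySem.Set String) (lengths : List Int) :
    ∀ is : List Int, pvScanPos l names lengths is = none →
      ∀ i ∈ is, ∀ n ∈ lengths, PySem.Str.slice l (some i) (some (i + n)) ∉ names := by
  intro is
  induction is with
  | nil => intro _ i hi; exact absurd hi List.not_mem_nil
  | cons i0 rest ih =>
    intro h i hi n hn
    unfold pvScanPos at h
    split at h
    · exact absurd h (by simp)
    · rename_i hnone
      rcases List.mem_cons.1 hi with rfl | hi
      · exact pvScanLens_none l names i lengths hnone n hn
      · exact ih h i hi n hn

-- if a known name of a known length occurs in a nonempty line, the scan succeeds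
theorem pvFindKnown_complete (l m : String) (names : PySem.Set String) (lengths : List Int)
    (hl : l.toList ≠ []) (hm : m ∈ names) (hlen : (m.toList.length : Int) ∈ lengths)
    (hin : PySem.Str.isIn m l = true) :
    pvFindKnown l names lengths ≠ none := by
  intro hnone
  have hscan := pvScanPos_none l names lengths _ hnone
  rw [PySem.Str.isIn_iff_infix] at hin
  obtain ⟨pre, suf, hdecomp⟩ := hin
  by_cases hme : m.toList = []
  · -- empty name: window of length 0 at position 0 is m
    have h0 : (0 : Int) ∈ PySem.List.pyRange 0 (PySem.Str.len l) 1 := by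
      rw [PySem.List.mem_pyRange_one]
      have h1 : 0 < l.toList.length := List.length_pos_iff.2 hl
      have hll : PySem.Str.len l = (l.toList.length : Int) := by simp [pysem]
      rw [hll]
      omega
    have hlen0 : (0 : Int) ∈ lengths := by
      rw [hme] at hlen; simpa using hlen
    refine hscan 0 h0 0 hlen0 ?_
    have hw : PySem.Str.slice l (some 0) (some (0 + 0)) = m := by
      apply String.toList_inj.mp
      rw [PySem.Str.toList_slice, PySem.Chars.slice_eq_listSlice,
          PySem.List.slice_toNat _ (by omega) (by omega), hme]
      simp
    rw [hw]; exact hm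
  · -- nonempty name: window at its occurrence is m
    have hmlen : 0 < m.toList.length := List.length_pos_iff.2 hme
    have hi : ((pre.length : Int)) ∈ PySem.List.pyRange 0 (PySem.Str.len l) 1 := by
      rw [PySem.List.mem_pyRange_one]
      have h1 : l.toList.length = pre.length + m.toList.length + suf.length := by
        rw [← hdecomp]; simp; omega
      have hll : PySem.Str.len l = (l.toList.length : Int) := by simp [pysem]
      rw [hll]
      omega
    refine hscan (pre.length : Int) hi (m.toList.length : Int) hlen ?_
    have hw : PySem.Str.slice l (some (pre.length : Int))
        (some ((pre.length : Int) + (m.toList.length : Int))) = m := by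
      apply String.toList_inj.mp
      rw [PySem.Str.toList_slice, PySem.Chars.slice_eq_listSlice,
          PySem.List.slice_natCast_add]
      rw [← hdecomp]
      simp
    rw [hw]; exact hm

-- a line starting with "-" or "+" is nonempty
theorem pvSign_nonempty (l p : String) (hp : p.toList ≠ [])
    (h : PySem.Str.startswith l p = true) : l.toList ≠ [] := by
  rw [PySem.Str.startswith_eq, PySem.Chars.startswith_iff] at h
  intro hl
  rw [hl] at h
  exact hp (List.prefix_nil.mp h)

-- every length in B's table is nonnegative, and the length of each key is present
theorem pvLens_nonneg (t : List (String × String)) :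
    ∀ n ∈ PySem.List.sorted (PySem.Set.ofList (t.map (fun p => PySem.Str.len p.1))) (fun x => x) false, 0 ≤ n := by
  intro n hn
  rw [PySem.List.mem_sorted, PySem.Set.mem_ofList] at hn
  obtain ⟨p, _, rfl⟩ := List.mem_map.1 hn
  simp [pysem]

theorem pvLens_mem (t : List (String × String)) (p : String × String) (hp : p ∈ t) :
    ((p.1.toList.length : Int)) ∈ PySem.List.sorted (PySem.Set.ofList (t.map (fun p => PySem.Str.len p.1))) (fun x => x) false := by
  rw [PySem.List.mem_sorted, PySem.Set.mem_ofList]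
  refine List.mem_map.2 ⟨p, hp, ?_⟩
  simp [pysem]

-- per-line equivalence of A's method scan and B's window scan, given the uniqueness tie condition
theorem pvFind_eq (l : String) (t : List (String × String))
    (hl : l.toList ≠ [])
    (huniq : ∀ p ∈ t, ∀ q ∈ t, PySem.Str.isIn p.1 l = true → PySem.Str.isIn q.1 l = true → p.1 = q.1) :
    pvFindKnown l (PySem.Set.ofList (t.map Prod.fst))
      (PySem.List.sorted (PySem.Set.ofList (t.map (fun p => PySem.Str.len p.1))) (fun x => x) false)
      = pvFindMethod l t := by
  have hnames : ∀ w, w ∈ PySem.Set.ofList (t.map Prod.fst) ↔ ∃ p ∈ t, p.1 = w := by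
    intro w
    rw [PySem.Set.mem_ofList, List.mem_map]
  have hposnn : ∀ i ∈ PySem.List.pyRange 0 (PySem.Str.len l) 1, (0 : Int) ≤ i := by
    intro i hi
    rw [PySem.List.mem_pyRange_one] at hi
    exact hi.1
  rcases hA : pvFindMethod l t with _ | m
  · -- A finds nothing: B must find nothing either
    rcases hB : pvFindKnown l _ _ with _ | w
    · rfl
    · exfalso
      obtain ⟨hwmem, hwin⟩ := pvScanPos_some l _ _ (pvLens_nonneg t) _ hposnn w hB
      obtain ⟨p, hp, rfl⟩ := (hnames w).1 hwmem
      have := (pvFindMethod_none l t).1 hA p hp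
      rw [hwin] at this
      exact Bool.noConfusion this
  · -- A finds m: B finds some known name, equal to m by uniqueness
    obtain ⟨hmk, hmin⟩ := pvFindMethod_some l m t hA
    obtain ⟨pm, hpm, hpm1⟩ := List.mem_map.1 hmk
    rcases hB : pvFindKnown l _ _ with _ | w
    · exfalso
      refine pvFindKnown_complete l m _ _ hl ?_ ?_ ?_ hB
      · exact (hnames m).2 ⟨pm, hpm, hpm1⟩
      · have := pvLens_mem t pm hpm
        rw [hpm1] at this
        exact this
      · exact hmin
    · obtain ⟨hwmem, hwin⟩ := pvScanPos_some l _ _ (pvLens_nonneg t) _ hposnn w hB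
      obtain ⟨pw, hpw, hpw1⟩ := (hnames w).1 hwmem
      have : pw.1 = pm.1 := huniq pw hpw pm hpm (by rw [hpw1]; exact hwin) (by rw [hpm1]; exact hmin)
      rw [hpw1, hpm1] at this
      rw [this]

-- main induction over the diff lines
theorem pvMain (fl tl : List (String × String)) :
    ∀ lines : List String,
      (∀ l ∈ lines,
        (PySem.Str.startswith l "-" = true →
          ∀ p ∈ fl, ∀ q ∈ fl, PySem.Str.isIn p.1 l = true → PySem.Str.isIn q.1 l = true → p.1 = q.1) ∧
        (PySem.Str.startswith l "+" = true →
          ∀ p ∈ tl, ∀ q ∈ tl, PySem.Str.isIn p.1 l = true → PySem.Str.isIn q.1 l = true → p.1 = q.1)) →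
      pvLinesA fl tl lines =
        pvLinesB fl tl (PySem.Set.ofList (fl.map Prod.fst)) (PySem.Set.ofList (tl.map Prod.fst))
          (PySem.List.sorted (PySem.Set.ofList (fl.map (fun p => PySem.Str.len p.1))) (fun x => x) false)
          (PySem.List.sorted (PySem.Set.ofList (tl.map (fun p => PySem.Str.len p.1))) (fun x => x) false)
          lines := by
  intro lines
  induction lines with
  | nil => intro _; rfl
  | cons l rest ih =>
    intro hpre
    have hrest := fun l' hl' => hpre l' (List.mem_cons_of_mem _ hl')
    have hhead := hpre l List.mem_cons_self
    unfold pvLinesA pvLinesB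
    by_cases hminus : PySem.Str.startswith l "-" = true
    · rw [if_pos hminus, if_pos hminus]
      rw [pvFind_eq l fl (pvSign_nonempty l "-" (by decide) hminus) (hhead.1 hminus)]
      rcases pvFindMethod l fl with _ | m
      · exact ih hrest
      · rfl
    · rw [Bool.not_eq_true] at hminus
      simp only [hminus, Bool.false_eq_true, if_false]
      by_cases hplus : PySem.Str.startswith l "+" = true
      · rw [if_pos hplus, if_pos hplus]
        rw [pvFind_eq l tl (pvSign_nonempty l "+" (by decide) hplus) (hhead.2 hplus)]
        rcases pvFindMethod l tl with _ | m
        · exact ih hrest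
        · rfl
      · rw [Bool.not_eq_true] at hplus
        simp only [hplus, Bool.false_eq_true, if_false]
        exact ih hrest

-- ===== VERDICT (by name: the statement is the Claim_ definition above) =====
theorem has_method_change_spec : Claim_equal_has_method_change := by
  intro diff_text fl tl _ hpre
  unfold Spec_has_method_change has_method_change has_method_change_alt
  exact pvMain fl tl (PySem.Str.splitlines diff_text) hpre
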